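-- pv_equiv track=rewrite | github.com/wangyuhan1101/answer | hanoi.py | getMovableDiskIndice
-- ===== SOURCE A (Python) =====
-- def getMovableDiskIndice(currentState):
-- 	movableDiskIndice = set()
-- 	length = len(currentState)
-- 	for i in range(0, length):
-- 		if i == length - 1:
-- 			movableDiskIndice.add(i)
-- 			continue
-- 		isMovable = True
-- 		for j in range(i+1, length):
-- 			if currentState[i] == currentState[j]:
-- 				isMovable = False
-- 				break
-- 		if isMovable:
-- 			movableDiskIndice.add(i)
-- 	return movableDiskIndice
-- ===== SOURCE B (Python) =====
-- def getMovableDiskIndice(currentState):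
-- 	# Single pass: record for each value its last index; an index is movable
-- 	# exactly when it is the last occurrence of its value.
-- 	last = {}
-- 	for i, v in enumerate(currentState):
-- 		last[v] = i
-- 	return {i for i, v in enumerate(currentState) if last[v] == i}
-- ===== Notes on version B (the rewrite author's own statement) =====
-- stated objective: faster
-- what changed: Replaced the quadratic scan-ahead per index by one pass building a value->last-index dict and then selecting the indices that equal their value's last index.
import Mathlib
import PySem

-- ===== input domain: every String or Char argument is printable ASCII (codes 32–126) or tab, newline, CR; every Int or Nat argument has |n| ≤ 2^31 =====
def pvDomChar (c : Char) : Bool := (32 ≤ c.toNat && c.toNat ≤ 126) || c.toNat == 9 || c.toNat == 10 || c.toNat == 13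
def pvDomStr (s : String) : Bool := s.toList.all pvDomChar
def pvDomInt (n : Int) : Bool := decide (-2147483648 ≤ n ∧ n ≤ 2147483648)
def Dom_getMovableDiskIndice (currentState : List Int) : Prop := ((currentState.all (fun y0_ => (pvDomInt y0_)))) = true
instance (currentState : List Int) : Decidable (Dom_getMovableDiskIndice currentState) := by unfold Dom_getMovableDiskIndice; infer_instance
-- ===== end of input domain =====

-- B replaces A's quadratic scan-ahead per index with a single dict pass (value -> last index); equivalence proved on all inputs.

-- ===== PORT A =====
-- inner 'for j … if equal: isMovable = False; break' computes exactly: isMovable = no later equal element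
def getMovableDiskIndice (currentState : List Int) : List Int :=
  let length : Int := currentState.length
  (PySem.List.pyRange 0 length 1).foldl
    (fun movableDiskIndice i =>
      if i = length - 1 then PySem.Set.add movableDiskIndice i
      else
        let isMovable : Bool :=
          (PySem.List.pyRange (i + 1) length 1).all
            (fun j => !(PySem.List.pyGetD currentState i 0 == PySem.List.pyGetD currentState j 0))
        if isMovable then PySem.Set.add movableDiskIndice i else movableDiskIndice)
    PySem.Set.empty

-- ===== PORT B =====
-- 'last[v]' can never raise (v was inserted in the first pass), so it is ported as get? compared with 'some i'
def getMovableDiskIndice_alt (currentState : List Int) : List Int :=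
  let last : PySem.Dict Int Int :=
    (PySem.List.enumerate currentState 0).foldl (fun d p => d.insert p.2 p.1) PySem.Dict.empty
  (PySem.List.enumerate currentState 0).foldl
    (fun acc p => if last.get? p.2 == some p.1 then PySem.Set.add acc p.1 else acc)
    PySem.Set.empty

-- ===== PRECONDITION & SPEC =====
def Spec_getMovableDiskIndice (currentState : List Int) (out : List Int) : Prop := out = getMovableDiskIndice_alt currentState
instance (currentState : List Int) (out : List Int) : Decidable (Spec_getMovableDiskIndice currentState out) := by unfold Spec_getMovableDiskIndice; infer_instance

-- ===== CLAIM (what is proved, stated in full; the proofs are below) =====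
def Claim_equal_getMovableDiskIndice : Prop := ∀ (currentState : List Int), Dom_getMovableDiskIndice currentState → Spec_getMovableDiskIndice currentState (getMovableDiskIndice currentState)

-- ===== LEMMAS AND PROOFS =====

-- index of the last occurrence of v in cs (meaningful when v ∈ cs)
def lastNat : List Int → Int → Nat
  | [], _ => 0
  | _ :: xs, v => if v ∈ xs then lastNat xs v + 1 else 0

-- B's dict after the first pass: it maps each value of cs to the index of its last occurrence
theorem get?_buildLast (cs : List Int) : ∀ (s : Int) (d : PySem.Dict Int Int) (v : Int),
    ((PySem.List.enumerate cs s).foldl (fun d p => d.insert p.2 p.1) d).get? v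
      = if v ∈ cs then some (s + (lastNat cs v : Int)) else d.get? v := by
  induction cs with
  | nil => intro s d v; simp [PySem.List.enumerate]
  | cons x xs ih =>
      intro s d v
      rw [PySem.List.enumerate_cons]
      simp only [List.foldl_cons, ih (s + 1) (d.insert x s) v, lastNat]
      by_cases hx : v ∈ xs
      · simp only [hx, List.mem_cons, or_true, if_pos]
        push_cast; ring_nf
      · by_cases hv : v = x
        · subst hv
          simp [hx, PySem.Dict.get?_insert_self]
        · simp [hx, hv, PySem.Dict.get?_insert_of_ne _ _ hv]

-- 'j is the last occurrence of its own value' ↔ 'no later element equals cs[j]'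
theorem lastNat_eq_iff (cs : List Int) : ∀ (j : Nat) (hj : j < cs.length),
    (lastNat cs cs[j] = j ↔ ∀ (k : Nat) (hk : k < cs.length), j < k → cs[k] ≠ cs[j]) := by
  induction cs with
  | nil => intro j hj; simp at hj
  | cons x xs ih =>
      intro j hj
      cases j with
      | zero =>
          simp only [List.getElem_cons_zero, lastNat]
          constructor
          · intro h k hk hk0 hne
            by_cases hx : x ∈ xs
            · simp [hx] at h
            · cases k with
              | zero => omega
              | succ m =>
                  exact hx (hne ▸ List.getElem_mem (by simpa using Nat.lt_of_succ_lt_succ hk))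
          · intro h
            have hx : x ∉ xs := by
              intro hmem
              obtain ⟨m, hm, hval⟩ := List.getElem_of_mem hmem
              exact h (m + 1) (by simpa using Nat.succ_lt_succ hm) (Nat.succ_pos m)
                (by simpa using hval)
            simp [hx]
      | succ m =>
          have hm : m < xs.length := by simpa using Nat.lt_of_succ_lt_succ hj
          have hmem : xs[m] ∈ xs := List.getElem_mem hm
          simp only [List.getElem_cons_succ, lastNat, hmem, if_pos]
          have step : (∀ (k : Nat) (hk : k < (x :: xs).length), m + 1 < k → (x :: xs)[k] ≠ xs[m])
              ↔ (∀ (k : Nat) (hk : k < xs.length), m < k → xs[k] ≠ xs[m]) := by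
            constructor
            · intro h k hk hmk
              have := h (k + 1) (by simpa using Nat.succ_lt_succ hk) (by omega)
              simpa using this
            · intro h k hk hmk
              cases k with
              | zero => omega
              | succ p =>
                  have hp : p < xs.length := by simpa using Nat.lt_of_succ_lt_succ hk
                  simpa using h p hp (by omega)
          rw [step, ← ih m hm]
          omega

theorem getMovableDiskIndice_spec : Claim_equal_getMovableDiskIndice := by
  intro cs _
  unfold Spec_getMovableDiskIndice getMovableDiskIndice getMovableDiskIndice_alt
  simp only [get?_buildLast]
  rw [PySem.List.enumerate_eq_map_pyRange (d := 0), List.foldl_map]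
  refine (PySem.List.foldl_congr_mem _ _ _ _ ?_).symm
  intro acc i hi
  rw [PySem.List.mem_pyRange_one] at hi
  obtain ⟨h0, h1⟩ := hi
  have hlen : i.toNat < cs.length := by omega
  have hget : PySem.List.pyGetD cs i 0 = cs[i.toNat] := PySem.List.pyGetD_eq_getElem _ _ h0 (by omega)
  have hmem : cs[i.toNat] ∈ cs := List.getElem_mem hlen
  simp only [hget]
  rw [if_pos hmem]
  -- B's condition as a statement about later occurrences
  have hB : ((some ((0 : Int) + (lastNat cs cs[i.toNat] : Int)) == some i) = true)
      ↔ ∀ (k : Nat) (hk : k < cs.length), i.toNat < k → cs[k] ≠ cs[i.toNat] := by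
    rw [← lastNat_eq_iff cs i.toNat hlen]
    simp only [beq_iff_eq, Option.some.injEq, zero_add]
    omega
  by_cases hlast : i = (cs.length : Int) - 1
  · -- last index: A adds unconditionally; B's condition is vacuously true
    rw [if_pos hlast, if_pos]
    exact hB.mpr (fun k hk hik => absurd hik (by omega))
  · rw [if_neg hlast]
    -- A's inner all-loop ↔ the same statement about later occurrences
    have hA : ((PySem.List.pyRange (i + 1) (cs.length : Int) 1).all
          (fun j => !(cs[i.toNat] == PySem.List.pyGetD cs j 0)) = true)
        ↔ ∀ (k : Nat) (hk : k < cs.length), i.toNat < k → cs[k] ≠ cs[i.toNat] := by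
      rw [List.all_eq_true]
      constructor
      · intro h k hk hik
        have hkmem : (k : Int) ∈ PySem.List.pyRange (i + 1) (cs.length : Int) 1 := by
          rw [PySem.List.mem_pyRange_one]; omega
        have := h _ hkmem
        rw [PySem.List.pyGetD_eq_getElem _ _ (by omega) (by simpa using hk)] at this
        simp only [Bool.not_eq_eq_eq_not, Bool.not_true, beq_eq_false_iff_ne, ne_eq] at this
        simpa using fun he => this (by simpa using he.symm ▸ rfl)
      · intro h j hj
        rw [PySem.List.mem_pyRange_one] at hj
        have hjlen : j.toNat < cs.length := by omega
        rw [PySem.List.pyGetD_eq_getElem _ _ (by omega) (by omega)]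
        have := h j.toNat hjlen (by omega)
        simp only [Bool.not_eq_eq_eq_not, Bool.not_true, beq_eq_false_iff_ne, ne_eq]
        exact fun he => this (by simpa using he.symm)
    by_cases hc : ∀ (k : Nat) (hk : k < cs.length), i.toNat < k → cs[k] ≠ cs[i.toNat]
    · rw [if_pos (hA.mpr hc), if_pos (hB.mpr hc)]
    · rw [if_neg (fun h => hc (hA.mp h)), if_neg (fun h => hc (hB.mp h))]
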